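-- pv_equiv track=rewrite | github.com/444chak/Networkers | api/src/utils/IPV4.py | get_ipv4_mask
-- ===== SOURCE A (Python) =====
-- def is_valid(address):
--     """
--     Checks if an IPv4 address is valid.
--
--     :param address: A string representing the IPv4 address (e.g., "192.168.1.1").
--     :return: True if the address is valid, False otherwise.
--     """
--     octets = address.split('.')
--
--     if len(octets) != 4:
--         return False
--
--     for octet in octets:
--         if not octet.isdigit() or not (0 <= int(octet) <= 255):
--             return False
--
--     return True
--
-- def get_ipv4_mask(cidr):
--     """
--     Calculates the subnet mask from an IPv4 address in CIDR notation.
--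
--     :param cidr: A string representing an IPv4 address in CIDR notation (e.g., "192.168.1.1/24").
--     :return: A string representing the subnet mask (e.g., "255.255.255.0"),
--              or an error message if the input is invalid.
--     """
--     if '/' not in cidr:
--         return "Invalid CIDR notation"
--
--     try:
--         address, prefix = cidr.split('/')
--         prefix = int(prefix)
--     except ValueError:
--         return "Invalid CIDR notation"
--
--     if not is_valid(address) or not (0 <= prefix <= 32):
--         return "Invalid IPv4 address or CIDR prefix"
--
--     binary_mask = '1' * prefix + '0' * (32 - prefix)
--
--     mask_octets = [int(binary_mask[i:i+8], 2) for i in range(0, 32, 8)]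
--
--     mask = '.'.join(map(str, mask_octets))
--
--     return mask
-- ===== SOURCE B (Python) =====
-- def is_valid(address):
--     octets = address.split('.')
--     return len(octets) == 4 and all(
--         o.isdigit() and 0 <= int(o) <= 255 for o in octets
--     )
--
-- def get_ipv4_mask(cidr):
--     if '/' not in cidr:
--         return "Invalid CIDR notation"
--
--     try:
--         address, prefix = cidr.split('/')
--         prefix = int(prefix)
--     except ValueError:
--         return "Invalid CIDR notation"
--
--     if not is_valid(address) or not (0 <= prefix <= 32):
--         return "Invalid IPv4 address or CIDR prefix"
--
--     m = (0xFFFFFFFF << (32 - prefix)) & 0xFFFFFFFF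
--     return '.'.join(str((m >> s) & 255) for s in (24, 16, 8, 0))
-- ===== Notes on version B (the rewrite author's own statement) =====
-- stated objective: idiomatic
-- what changed: The mask is computed with bit arithmetic ((0xFFFFFFFF << (32-prefix)) & 0xFFFFFFFF, octets extracted by shifts and & 255) instead of building a 32-character bit string, slicing it into four 8-character pieces and re-parsing each piece as a base-2 integer; is_valid becomes a length check plus all(...) instead of a loop with early returns.
import Mathlib
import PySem

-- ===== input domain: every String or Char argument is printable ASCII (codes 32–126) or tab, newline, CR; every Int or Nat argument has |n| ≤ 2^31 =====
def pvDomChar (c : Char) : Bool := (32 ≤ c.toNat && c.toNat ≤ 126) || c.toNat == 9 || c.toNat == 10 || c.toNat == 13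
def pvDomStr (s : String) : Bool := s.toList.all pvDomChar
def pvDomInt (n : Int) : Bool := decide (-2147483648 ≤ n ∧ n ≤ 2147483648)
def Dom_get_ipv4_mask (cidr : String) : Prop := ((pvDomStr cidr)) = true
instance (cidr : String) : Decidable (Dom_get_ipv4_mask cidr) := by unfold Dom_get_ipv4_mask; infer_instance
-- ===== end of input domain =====

-- B replaces A's 32-char bit-string + slice/parse mask construction with direct
-- bit arithmetic (shift/mask octet extraction); objective: idiomatic. Control flow around it is unchanged.


-- ===== PORT A =====
-- is_valid's for-loop with early 'return False'
def pvIsValidLoop : List String → Bool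
  | [] => true
  | octet :: rest =>
    if !PySem.Str.strIsdigit octet then false
    else
      -- int(octet) is only evaluated when isdigit is true (Python 'or' short-circuit), so none is unreachable
      match PySem.Int.ofStr? octet with
      | none => false
      | some n => if !(decide (0 ≤ n) && decide (n ≤ 255)) then false else pvIsValidLoop rest

def pvIsValid (address : String) : Bool :=
  let octets := (PySem.Str.split? address ".").getD []
  if octets.length ≠ 4 then false
  else pvIsValidLoop octets

-- binary_mask / mask_octets / join block of A ('1'*pfx + '0'*(32-pfx), 8-char slices parsed base 2)
def pvMaskA (pfx : Int) : String :=
  let binary_mask : List Char :=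
    List.replicate pfx.toNat '1' ++ List.replicate (32 - pfx).toNat '0'
  let mask_octets : List Int :=
    (PySem.List.pyRange 0 32 8).map (fun i =>
      -- int(binary_mask[i:i+8], 2); every slice has 8 binary digits, so none is unreachable
      (PySem.Int.ofCharsBase? (PySem.List.slice binary_mask (some i) (some (i + 8))) 2).getD 0)
  PySem.Str.join "." (mask_octets.map PySem.Int.toStr)

def get_ipv4_mask (cidr : String) : String :=
  if !PySem.Str.isIn "/" cidr then "Invalid CIDR notation"
  else
    match PySem.Str.split? cidr "/" with
    | some [address, prefixStr] =>
      match PySem.Int.ofStr? prefixStr with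
      | none => "Invalid CIDR notation"   -- int(pfx) raised ValueError, caught
      | some pfx =>
        if !pvIsValid address || !(decide (0 ≤ pfx) && decide (pfx ≤ 32)) then
          "Invalid IPv4 address or CIDR prefix"
        else pvMaskA pfx
    | _ => "Invalid CIDR notation"        -- tuple unpacking raised ValueError, caught (none unreachable: sep is "/")

-- ===== PORT B =====
def pvOctetOk (o : String) : Bool :=
  PySem.Str.strIsdigit o &&
    (match PySem.Int.ofStr? o with
     | some n => decide (0 ≤ n) && decide (n ≤ 255)
     | none => false)

def pvIsValidAlt (address : String) : Bool :=
  let octets := (PySem.Str.split? address ".").getD []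
  octets.length == 4 && octets.all pvOctetOk

-- m = (0xFFFFFFFF << (32 - pfx)) & 0xFFFFFFFF; octets by shift-and-mask
def pvMaskB (pfx : Int) : String :=
  let m : Int := PySem.Int.band ((0xFFFFFFFF : Int) <<< (32 - pfx).toNat) 0xFFFFFFFF
  PySem.Str.join "."
    (([24, 16, 8, 0] : List Nat).map (fun s => PySem.Int.toStr (PySem.Int.band (m >>> s) 255)))

def get_ipv4_mask_alt (cidr : String) : String :=
  if !PySem.Str.isIn "/" cidr then "Invalid CIDR notation"
  else
    match PySem.Str.split? cidr "/" with
    | none => "Invalid CIDR notation"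
    | some parts =>
      match parts with
      | [] => "Invalid CIDR notation"
      | [_] => "Invalid CIDR notation"
      | address :: prefixStr :: [] =>
        match PySem.Int.ofStr? prefixStr with
        | some pfx =>
          if !pvIsValidAlt address || !(decide (0 ≤ pfx) && decide (pfx ≤ 32)) then
            "Invalid IPv4 address or CIDR prefix"
          else pvMaskB pfx
        | none => "Invalid CIDR notation"
      | _ :: _ :: _ :: _ => "Invalid CIDR notation"

-- ===== PRECONDITION & SPEC =====
def Spec_get_ipv4_mask (cidr : String) (out : String) : Prop := out = get_ipv4_mask_alt cidr
instance (cidr : String) (out : String) : Decidable (Spec_get_ipv4_mask cidr out) := by unfold Spec_get_ipv4_mask; infer_instance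

-- ===== CLAIM (what is proved, stated in full; the proofs are below) =====
def Claim_equal_get_ipv4_mask : Prop := ∀ (cidr : String), Dom_get_ipv4_mask cidr → Spec_get_ipv4_mask cidr (get_ipv4_mask cidr)

-- ===== LEMMAS AND PROOFS =====

theorem pvIsValidLoop_eq_all (l : List String) : pvIsValidLoop l = l.all pvOctetOk := by
  induction l with
  | nil => rfl
  | cons o rest ih =>
    simp only [pvIsValidLoop, List.all_cons, pvOctetOk]
    cases h : PySem.Str.strIsdigit o <;> simp
    cases PySem.Int.ofStr? o with
    | none => simp
    | some n =>
      by_cases h0 : (0 ≤ n) <;> by_cases h1 : (n ≤ 255) <;> simp [h0, h1, ih]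

theorem pvIsValid_eq (a : String) : pvIsValid a = pvIsValidAlt a := by
  simp only [pvIsValid, pvIsValidAlt, pvIsValidLoop_eq_all]
  by_cases h : ((PySem.Str.split? a ".").getD []).length = 4 <;> simp [h]

theorem pvMask_eq_nat : ∀ p : Nat, p < 33 → pvMaskA (p : Int) = pvMaskB (p : Int) := by decide

theorem pvMask_eq (pfx : Int) (h0 : 0 ≤ pfx) (h1 : pfx ≤ 32) :
    pvMaskA pfx = pvMaskB pfx := by
  obtain ⟨p, rfl⟩ : ∃ p : Nat, pfx = (p : Int) :=
    ⟨pfx.toNat, (Int.toNat_of_nonneg h0).symm⟩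
  exact pvMask_eq_nat p (by exact_mod_cast Int.lt_add_one_iff.mpr h1)

-- ===== VERDICT (by name: the statement is the Claim_ definition above) =====
theorem get_ipv4_mask_spec : Claim_equal_get_ipv4_mask := by
  intro cidr _
  unfold Spec_get_ipv4_mask get_ipv4_mask get_ipv4_mask_alt
  cases h1 : PySem.Str.isIn "/" cidr with
  | false => rfl
  | true =>
    simp only [Bool.not_true, Bool.false_eq_true, if_false]
    cases hs : PySem.Str.split? cidr "/" with
    | none => rfl
    | some parts =>
      match parts with
      | [] => rfl
      | [_] => rfl
      | _ :: _ :: _ :: _ => rfl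
      | [a, b] =>
        show (match PySem.Int.ofStr? b with
              | none => "Invalid CIDR notation"
              | some pfx =>
                if (!pvIsValid a || !(decide (0 ≤ pfx) && decide (pfx ≤ 32))) = true then
                  "Invalid IPv4 address or CIDR prefix"
                else pvMaskA pfx) =
             (match PySem.Int.ofStr? b with
              | some pfx =>
                if (!pvIsValidAlt a || !(decide (0 ≤ pfx) && decide (pfx ≤ 32))) = true then
                  "Invalid IPv4 address or CIDR prefix"
                else pvMaskB pfx
              | none => "Invalid CIDR notation")
        cases hb : PySem.Int.ofStr? b with
        | none => rfl
        | some pfx =>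
          simp only [pvIsValid_eq]
          by_cases hc : (!pvIsValidAlt a || !(decide (0 ≤ pfx) && decide (pfx ≤ 32))) = true
          · rw [if_pos hc, if_pos hc]
          · rw [if_neg hc, if_neg hc]
            simp only [Bool.or_eq_true, Bool.not_eq_true', not_or] at hc
            have h2 : (decide (0 ≤ pfx) && decide (pfx ≤ 32)) = true := by
              cases h : (decide (0 ≤ pfx) && decide (pfx ≤ 32)) with
              | true => rfl
              | false => exact absurd h hc.2
            simp only [Bool.and_eq_true, decide_eq_true_eq] at h2
            exact pvMask_eq pfx h2.1 h2.2
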